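-- pv_equiv track=rewrite | github.com/walnutgeek/lythonic | src/lythonic/compose/namespace.py | _parse_tag_expr
-- ===== SOURCE A (Python) =====
-- def _parse_tag_expr(expr: str) -> list[str]:
--     """
--     Tokenize a tag query expression into a list of tokens. Tokens are
--     tag names, `&`, `|`, or `~`. Raises `ValueError` for empty or
--     whitespace-only expressions.
--     """
--     tokens: list[str] = []
--     for part in expr.split():
--         i = 0
--         while i < len(part):
--             if part[i] in ("&", "|", "~"):
--                 tokens.append(part[i])
--                 i += 1
--             else:
--                 j = i
--                 while j < len(part) and part[j] not in ("&", "|", "~"):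
--                     j += 1
--                 tokens.append(part[i:j])
--                 i = j
--     if not tokens:
--         raise ValueError("Tag query expression is empty")
--     return tokens
-- ===== SOURCE B (Python) =====
-- def _parse_tag_expr(expr: str) -> list[str]:
--     """
--     Tokenize a tag query expression in a single left-to-right pass:
--     operator characters flush the pending name and are emitted alone;
--     whitespace just flushes; everything else extends the pending name.
--     """
--     tokens: list[str] = []
--     cur: list[str] = []
--     for c in expr:
--         if c in ("&", "|", "~"):
--             if cur:
--                 tokens.append("".join(cur))
--                 cur = []
--             tokens.append(c)
--         elif c.isspace():
--             if cur:
--                 tokens.append("".join(cur))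
--                 cur = []
--         else:
--             cur.append(c)
--     if cur:
--         tokens.append("".join(cur))
--     if not tokens:
--         raise ValueError("Tag query expression is empty")
--     return tokens
-- ===== Notes on version B (the rewrite author's own statement) =====
-- stated objective: alternative
-- what changed: Replaced split()-into-parts followed by an index-driven nested scan of each part with a single left-to-right character pass that maintains a pending-name buffer and classifies each character (operator / whitespace / name) as it arrives.
import Mathlib
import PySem

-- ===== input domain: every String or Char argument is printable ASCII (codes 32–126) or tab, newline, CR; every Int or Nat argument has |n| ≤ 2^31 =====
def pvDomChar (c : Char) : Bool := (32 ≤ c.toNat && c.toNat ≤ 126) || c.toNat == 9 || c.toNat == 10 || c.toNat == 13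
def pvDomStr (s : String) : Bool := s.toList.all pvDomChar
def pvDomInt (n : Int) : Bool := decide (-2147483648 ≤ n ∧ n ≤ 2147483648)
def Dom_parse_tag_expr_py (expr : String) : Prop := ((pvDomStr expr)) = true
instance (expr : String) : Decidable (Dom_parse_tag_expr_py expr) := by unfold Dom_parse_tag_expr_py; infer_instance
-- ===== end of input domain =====

-- B replaces A's split()+nested index scan by one left-to-right pass with a pending-name buffer (alternative decomposition, same cost).

-- ===== PORT A =====
-- `part[i] in ("&", "|", "~")`
def pvIsOp (c : Char) : Bool := c == '&' || c == '|' || c == '~'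

-- the inner `while i < len(part)` loop of A: at an operator emit it and advance by 1,
-- otherwise the nested `while j` scan finds the end of the name chunk (takeWhile/dropWhile
-- is exactly that scan and the slice part[i:j]).
def pvScanPartA : List Char → List String
  | [] => []
  | c :: rest =>
    if pvIsOp c then String.ofList [c] :: pvScanPartA rest
    else String.ofList (c :: rest.takeWhile (fun d => !pvIsOp d)) ::
         pvScanPartA (rest.dropWhile (fun d => !pvIsOp d))
termination_by cs => cs.length
decreasing_by
  all_goals
    (have := List.length_dropWhile_le (fun d => !pvIsOp d) rest;
     simp only [List.length_cons]; omega)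

-- `for part in expr.split(): …` accumulating into `tokens`
def parse_tag_expr_py (expr : String) : List String :=
  (PySem.Str.split₀ expr).foldl (fun tokens part => tokens ++ pvScanPartA part.toList) []

-- ===== PORT B =====
-- `if cur: tokens.append("".join(cur))`
def pvFlushB (cur : List Char) : List String :=
  if cur.isEmpty then [] else [String.ofList cur]

-- the single `for c in expr` loop of B with its pending buffer `cur`
def pvScanB : List Char → List Char → List String
  | [], cur => pvFlushB cur
  | c :: cs, cur =>
    if pvIsOp c then pvFlushB cur ++ String.ofList [c] :: pvScanB cs []
    else if PySem.Chars.isspace c then pvFlushB cur ++ pvScanB cs []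
    else pvScanB cs (cur ++ [c])

def parse_tag_expr_py_alt (expr : String) : List String :=
  pvScanB expr.toList []

-- ===== PRECONDITION & SPEC =====
-- A raises ValueError exactly when the expression is empty or whitespace-only (no token produced); so does B.
def Pre_parse_tag_expr_py (expr : String) : Prop :=
  expr.toList.any (fun c => !PySem.Chars.isspace c) = true
instance (expr : String) : Decidable (Pre_parse_tag_expr_py expr) := by unfold Pre_parse_tag_expr_py; infer_instance
def pvWitness_parse_tag_expr_py : String := "a&b"

def Spec_parse_tag_expr_py (expr : String) (out : List String) : Prop := out = parse_tag_expr_py_alt expr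
instance (expr : String) (out : List String) : Decidable (Spec_parse_tag_expr_py expr out) := by unfold Spec_parse_tag_expr_py; infer_instance

-- ===== CLAIM (what is proved, stated in full; the proofs are below) =====
def Claim_equal_parse_tag_expr_py : Prop := ∀ (expr : String), Dom_parse_tag_expr_py expr → Pre_parse_tag_expr_py expr → Spec_parse_tag_expr_py expr (parse_tag_expr_py expr)

-- ===== LEMMAS AND PROOFS =====

-- characters that continue a name token: neither operator nor whitespace
def pvKeep (c : Char) : Bool := !pvIsOp c && !PySem.Chars.isspace c

-- canonical tokenization of the raw character stream; both ports are proved equal to it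
def pvToks : List Char → List String
  | [] => []
  | c :: cs =>
    if pvIsOp c then String.ofList [c] :: pvToks cs
    else if PySem.Chars.isspace c then pvToks cs
    else String.ofList (c :: cs.takeWhile pvKeep) :: pvToks (cs.dropWhile pvKeep)
termination_by cs => cs.length
decreasing_by
  all_goals
    (have := List.length_dropWhile_le pvKeep cs;
     simp only [List.length_cons]; omega)

theorem pv_op_not_space (c : Char) (hc : PySem.Chars.isspace c = true) : pvIsOp c = false := by
  cases h : pvIsOp c
  · rfl
  · exfalso
    simp only [pvIsOp, Bool.or_eq_true, beq_iff_eq] at h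
    rcases h with (h | h) | h <;> subst h <;> exact absurd hc (by decide)

theorem pv_takeWhile_congr {α : Type} (p q : α → Bool) :
    ∀ (l : List α), (∀ c ∈ l, p c = q c) → l.takeWhile p = l.takeWhile q
  | [], _ => rfl
  | c :: l, h => by
    simp only [List.takeWhile_cons, h c (List.mem_cons_self ..)]
    cases q c <;> simp [pv_takeWhile_congr p q l (fun d hd => h d (List.mem_cons_of_mem _ hd))]

theorem pv_dropWhile_congr {α : Type} (p q : α → Bool) :
    ∀ (l : List α), (∀ c ∈ l, p c = q c) → l.dropWhile p = l.dropWhile q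
  | [], _ => rfl
  | c :: l, h => by
    simp only [List.dropWhile_cons, h c (List.mem_cons_self ..)]
    cases q c <;> simp [pv_dropWhile_congr p q l (fun d hd => h d (List.mem_cons_of_mem _ hd))]

theorem pv_takeWhile_append_not {α : Type} (p : α → Bool) (c : α) (ys : List α) (hc : p c = false) :
    ∀ (l : List α), (l ++ c :: ys).takeWhile p = l.takeWhile p
  | [] => by simp [hc]
  | d :: l => by
    simp only [List.cons_append, List.takeWhile_cons]
    cases p d <;> simp [pv_takeWhile_append_not p c ys hc l]

theorem pv_dropWhile_append_not {α : Type} (p : α → Bool) (c : α) (ys : List α) (hc : p c = false) :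
    ∀ (l : List α), (l ++ c :: ys).dropWhile p = l.dropWhile p ++ c :: ys
  | [] => by simp [hc]
  | d :: l => by
    simp only [List.cons_append, List.dropWhile_cons]
    cases p d <;> simp [pv_dropWhile_append_not p c ys hc l]

-- A's inner scan computes the canonical tokenization on a whitespace-free part
theorem pvScanPartA_eq_toks : ∀ (cs : List Char),
    (∀ c ∈ cs, PySem.Chars.isspace c = false) → pvScanPartA cs = pvToks cs
  | [], _ => by rw [pvScanPartA, pvToks]
  | c :: rest, h => by
    have hrest : ∀ d ∈ rest, PySem.Chars.isspace d = false :=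
      fun d hd => h d (List.mem_cons_of_mem _ hd)
    have hcong : ∀ d ∈ rest, (fun d => !pvIsOp d) d = pvKeep d := by
      intro d hd; simp [pvKeep, hrest d hd]
    rw [pvScanPartA, pvToks]
    by_cases hop : pvIsOp c = true
    · rw [if_pos hop, if_pos hop, pvScanPartA_eq_toks rest hrest]
    · rw [if_neg hop, if_neg hop,
        if_neg (by simp [h c (List.mem_cons_self ..)] : ¬ PySem.Chars.isspace c = true),
        pv_takeWhile_congr _ pvKeep rest hcong, pv_dropWhile_congr _ pvKeep rest hcong,
        pvScanPartA_eq_toks (rest.dropWhile pvKeep)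
          (fun d hd => hrest d ((rest.dropWhile_sublist pvKeep).mem hd))]
termination_by cs => cs.length
decreasing_by
  all_goals
    (first
      | (simp only [List.length_cons]; omega)
      | (have := List.length_dropWhile_le pvKeep rest; simp only [List.length_cons]; omega))

-- tokenizing across a whitespace separator splits into independent tokenizations
theorem pvToks_append_space : ∀ (xs : List Char) (c : Char) (ys : List Char),
    PySem.Chars.isspace c = true → pvToks (xs ++ c :: ys) = pvToks xs ++ pvToks ys
  | [], c, ys, hc => by
    rw [List.nil_append]
    conv_lhs => rw [pvToks]
    rw [if_neg (by simp [pv_op_not_space c hc]), if_pos hc, pvToks, List.nil_append]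
  | d :: xs, c, ys, hc => by
    have hkc : pvKeep c = false := by simp [pvKeep, hc]
    rw [List.cons_append, pvToks, pvToks]
    by_cases hop : pvIsOp d = true
    · rw [if_pos hop, if_pos hop, pvToks_append_space xs c ys hc, List.cons_append]
    · by_cases hsp : PySem.Chars.isspace d = true
      · rw [if_neg hop, if_neg hop, if_pos hsp, if_pos hsp, pvToks_append_space xs c ys hc]
      · rw [if_neg hop, if_neg hop, if_neg hsp, if_neg hsp,
          pv_takeWhile_append_not pvKeep c ys hkc xs,
          pv_dropWhile_append_not pvKeep c ys hkc xs,
          pvToks_append_space (xs.dropWhile pvKeep) c ys hc, List.cons_append]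
termination_by xs => xs.length
decreasing_by
  all_goals
    (first
      | (simp only [List.length_cons]; omega)
      | (have := List.length_dropWhile_le pvKeep xs; simp only [List.length_cons]; omega))

-- split₀'s worker followed by A's per-part scan computes the canonical tokenization
theorem pv_go_flatMap : ∀ (cs cur : List Char) (acc : List (List Char)),
    (∀ c ∈ cur, PySem.Chars.isspace c = false) →
    (PySem.Chars.split₀.go cs cur acc).flatMap pvScanPartA
      = acc.reverse.flatMap pvScanPartA ++ pvToks (cur.reverse ++ cs)
  | [], cur, acc, h => by
    rw [PySem.Chars.split₀.go]
    cases hcur : cur.isEmpty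
    · have hcur' : cur ≠ [] := by simpa [List.isEmpty_iff] using hcur
      simp only [Bool.false_eq_true, if_false, List.reverse_cons, List.flatMap_append,
        List.flatMap_cons, List.flatMap_nil, List.append_nil, List.append_nil]
      rw [pvScanPartA_eq_toks cur.reverse (by simpa using h)]
    · have hcur' : cur = [] := by simpa [List.isEmpty_iff] using hcur
      subst hcur'
      simp [pvToks]
  | c :: cs, cur, acc, h => by
    rw [PySem.Chars.split₀.go]
    by_cases hsp : PySem.Chars.isspace c = true
    · rw [if_pos hsp]
      cases hcur : cur.isEmpty
      · have hcur' : cur ≠ [] := by simpa [List.isEmpty_iff] using hcur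
        simp only [Bool.false_eq_true, if_false]
        rw [pv_go_flatMap cs [] (cur.reverse :: acc) (by simp),
          pvToks_append_space cur.reverse c cs hsp]
        simp only [List.reverse_cons, List.flatMap_append, List.flatMap_cons, List.flatMap_nil,
          List.append_nil, List.reverse_nil, List.nil_append, List.append_assoc]
        rw [pvScanPartA_eq_toks cur.reverse (by simpa using h)]
      · have hcur' : cur = [] := by simpa [List.isEmpty_iff] using hcur
        subst hcur'
        rw [if_pos rfl, pv_go_flatMap cs [] acc (by simp)]
        simp only [List.reverse_nil, List.nil_append]
        rw [pvToks, if_neg (by simp [pv_op_not_space c hsp]), if_pos hsp]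
    · rw [if_neg hsp, pv_go_flatMap cs (c :: cur) acc ?hne]
      · rw [List.reverse_cons, List.append_assoc, List.singleton_append]
      · intro d hd
        rcases List.mem_cons.mp hd with rfl | hd
        · exact Bool.not_eq_true _ ▸ hsp
        · exact h d hd

-- B's single pass computes the canonical tokenization (with a pending buffer `cur`)
theorem pvScanB_eq : ∀ (cs cur : List Char),
    pvScanB cs cur =
      if cur.isEmpty then pvToks cs
      else String.ofList (cur ++ cs.takeWhile pvKeep) :: pvToks (cs.dropWhile pvKeep)
  | [], cur => by
    cases cur <;> simp [pvScanB, pvFlushB, pvToks]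
  | c :: cs, cur => by
    rw [pvScanB]
    by_cases hop : pvIsOp c = true
    · rw [if_pos hop, pvScanB_eq cs [], pvToks]
      cases cur <;>
        simp [hop, pvFlushB, (by simp [pvKeep, hop] : pvKeep c = false), pvToks]
    · rw [if_neg hop]
      by_cases hsp : PySem.Chars.isspace c = true
      · rw [if_pos hsp, pvScanB_eq cs [], pvToks]
        cases cur <;>
          simp [hop, hsp, pvFlushB, (by simp [pvKeep, hsp] : pvKeep c = false), pvToks]
      · have hk : pvKeep c = true := by simp [pvKeep, hop, hsp]
        rw [if_neg hsp, pvScanB_eq cs (cur ++ [c]), pvToks]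
        cases cur <;>
          simp [hop, hsp, hk]

theorem pvA_eq_toks (expr : String) : parse_tag_expr_py expr = pvToks expr.toList := by
  rw [parse_tag_expr_py, ← List.flatMap_eq_foldl]
  rw [PySem.Str.split₀]
  rw [List.flatMap_map]
  have : (fun p => pvScanPartA (String.ofList p).toList) = pvScanPartA := by
    funext p; rw [String.toList_ofList]
  rw [show (fun a => pvScanPartA (String.ofList a).toList)
      = fun p => pvScanPartA (String.ofList p).toList from rfl, this]
  rw [PySem.Chars.split₀, pv_go_flatMap expr.toList [] [] (by simp)]
  simp

-- ===== VERDICT (by name: the statement is the Claim_ definition above) =====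
theorem parse_tag_expr_py_spec : Claim_equal_parse_tag_expr_py := by
  intro expr _ _
  unfold Spec_parse_tag_expr_py
  rw [pvA_eq_toks, parse_tag_expr_py_alt, pvScanB_eq expr.toList []]
  rfl
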